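-- pv_equiv track=rewrite | github.com/kepy97/AIMazePathSolvingAlgorithm | Homework2.py | greedySearchAlgorithm
-- ===== SOURCE A (Python) =====
-- def greedySearchAlgorithm(type, cost, reach, budget):
--     typeFlag = [0 for i in type]
--     currentCost = 0
--     currentReach = 0
--     Flag = True
--     while Flag:
--         max = 0
--         index = None
--         for count, i in enumerate(cost):
--             if i > max and (currentCost + i) <= budget and not typeFlag[count]:
--                 max = i
--                 index = str(count)
--         if index == None:
--             Flag = False
--         else:
--             typeFlag[int(index)] = 1
--             currentCost = currentCost + cost[int(index)]
--             currentReach = currentReach + reach[int(index)]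
--     return (''.join(str(e) for e in typeFlag), currentCost, currentReach)
-- ===== SOURCE B (Python) =====
-- def greedySearchAlgorithm(type, cost, reach, budget):
--     # Sort once instead of rescanning per pick: visit indices by descending
--     # cost (first index wins ties) and take every positive-cost item that
--     # still fits in the budget.
--     flags = [0] * len(type)
--     order = sorted((i for i in range(len(cost)) if cost[i] > 0),
--                    key=lambda i: (-cost[i], i))
--     currentCost = 0
--     currentReach = 0
--     for i in order:
--         if currentCost + cost[i] <= budget:
--             flags[i] = 1
--             currentCost += cost[i]
--             currentReach += reach[i]
--     return (''.join(str(e) for e in flags), currentCost, currentReach)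
-- ===== Notes on version B (the rewrite author's own statement) =====
-- stated objective: alternative
-- what changed: A rescans the whole cost list once per selected item (repeated argmax); B sorts the positive-cost indices once by (-cost, index) and takes each item that still fits in a single pass.
-- outside the precondition, e.g. on greedySearchAlgorithm([0, 0], [5, 5], [5], 5): A returns ('10', 5, 5), B returns ('10', 5, 5); on greedySearchAlgorithm([0], [5, 5], [0, 0], 5): A returns ('1', 5, 0), B returns ('1', 5, 0)
import Mathlib
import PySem

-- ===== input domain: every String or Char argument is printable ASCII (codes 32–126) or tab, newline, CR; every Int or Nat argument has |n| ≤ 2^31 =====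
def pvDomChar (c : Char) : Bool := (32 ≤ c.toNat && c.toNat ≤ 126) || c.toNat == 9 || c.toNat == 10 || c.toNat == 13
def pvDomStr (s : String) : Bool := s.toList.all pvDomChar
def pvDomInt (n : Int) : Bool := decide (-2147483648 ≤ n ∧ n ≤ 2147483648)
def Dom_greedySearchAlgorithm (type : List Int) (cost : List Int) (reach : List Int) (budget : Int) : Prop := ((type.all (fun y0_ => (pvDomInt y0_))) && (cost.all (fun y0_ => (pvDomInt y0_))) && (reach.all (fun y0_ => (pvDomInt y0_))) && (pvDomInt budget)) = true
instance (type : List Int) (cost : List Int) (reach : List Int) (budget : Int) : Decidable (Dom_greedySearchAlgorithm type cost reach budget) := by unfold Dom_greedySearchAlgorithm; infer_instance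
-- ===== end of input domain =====

-- B replaces A's repeated full rescan (argmax per selected item) by one sort of the
-- positive-cost indices by (-cost, index) followed by a single take-if-it-fits pass.


-- ===== PORT A =====
-- the inner 'for count, i in enumerate(cost)' scan; 'not typeFlag[count]' is '= 0' (the flags
-- list holds only the ints 0/1); the found index is kept as the integer itself: Python stores
-- 'str(count)' and later applies int(), an identity roundtrip on this nonnegative index.
def pvScanA (typeFlag : List Int) (currentCost budget : Int) :
    List (Int × Int) → Int × Option Int → Int × Option Int
  | [], st => st
  | (count, i) :: rest, (max, index) =>
      if i > max ∧ currentCost + i ≤ budget ∧ PySem.List.pyGetD typeFlag count 0 = 0 then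
        pvScanA typeFlag currentCost budget rest (i, some count)
      else
        pvScanA typeFlag currentCost budget rest (max, index)

-- the 'while Flag' loop; fuel = cost.length + 1 is enough because every iteration flags one
-- more distinct index of cost (the 0-fuel branch is a totality guard, never reached on Pre_);
-- the list/index accesses are in range on Pre_ (pyGetD/pySetD defaults never used there).
def pvLoopA (cost reach : List Int) (budget : Int) :
    Nat → List Int → Int → Int → List Int × Int × Int
  | 0, typeFlag, currentCost, currentReach => (typeFlag, currentCost, currentReach)
  | fuel + 1, typeFlag, currentCost, currentReach =>
      match (pvScanA typeFlag currentCost budget (PySem.List.enumerate cost) (0, none)).2 with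
      | none => (typeFlag, currentCost, currentReach)
      | some index =>
          pvLoopA cost reach budget fuel
            (PySem.List.pySetD typeFlag index 1)
            (currentCost + PySem.List.pyGetD cost index 0)
            (currentReach + PySem.List.pyGetD reach index 0)

def greedySearchAlgorithm (type : List Int) (cost : List Int) (reach : List Int) (budget : Int) : String × Int × Int :=
  let typeFlag := type.map (fun _ => (0 : Int))
  let res := pvLoopA cost reach budget (cost.length + 1) typeFlag 0 0
  (PySem.Str.join "" (res.1.map PySem.Int.toStr), res.2.1, res.2.2)

-- ===== PORT B =====
-- sorted((i for i in range(len(cost)) if cost[i] > 0), key=lambda i: (-cost[i], i))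
def pvOrder (cost : List Int) : List Int :=
  PySem.List.sorted2
    ((PySem.List.pyRange 0 cost.length 1).filter (fun i => 0 < PySem.List.pyGetD cost i 0))
    (fun i => -(PySem.List.pyGetD cost i 0)) (fun i => i)

-- the body of B's single 'for i in order' pass
def pvStepB (cost reach : List Int) (budget : Int)
    (st : List Int × Int × Int) (i : Int) : List Int × Int × Int :=
  if st.2.1 + PySem.List.pyGetD cost i 0 ≤ budget then
    (PySem.List.pySetD st.1 i 1,
     st.2.1 + PySem.List.pyGetD cost i 0,
     st.2.2 + PySem.List.pyGetD reach i 0)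
  else st

def greedySearchAlgorithm_alt (type : List Int) (cost : List Int) (reach : List Int) (budget : Int) : String × Int × Int :=
  let res := (pvOrder cost).foldl (pvStepB cost reach budget) (type.map (fun _ => (0 : Int)), 0, 0)
  (PySem.Str.join "" (res.1.map PySem.Int.toStr), res.2.1, res.2.2)

-- ===== PRECONDITION & SPEC =====
-- Pre_ excludes the inputs on which some index k with 0 < cost[k] ≤ budget falls outside type
-- or reach: there Python A raises IndexError (typeFlag[k] resp. reach[k]) on most shapes, and
-- on the remaining shapes (the access shadowed by an equal earlier maximum, or the item never
-- picked) A's return is an accident of list lengths it never checked.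
def Pre_greedySearchAlgorithm (type : List Int) (cost : List Int) (reach : List Int) (budget : Int) : Prop :=
  ∀ k : Nat, k < cost.length → 0 < cost.getD k 0 → cost.getD k 0 ≤ budget →
    k < type.length ∧ k < reach.length
instance (type : List Int) (cost : List Int) (reach : List Int) (budget : Int) : Decidable (Pre_greedySearchAlgorithm type cost reach budget) := by unfold Pre_greedySearchAlgorithm; infer_instance

def pvWitness_greedySearchAlgorithm : List Int × List Int × List Int × Int :=
  ([0, 0, 0], [4, 2, 4], [7, 1, 5], 6)

def Spec_greedySearchAlgorithm (type : List Int) (cost : List Int) (reach : List Int) (budget : Int) (out : String × Int × Int) : Prop := out = greedySearchAlgorithm_alt type cost reach budget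
instance (type : List Int) (cost : List Int) (reach : List Int) (budget : Int) (out : String × Int × Int) : Decidable (Spec_greedySearchAlgorithm type cost reach budget out) := by unfold Spec_greedySearchAlgorithm; infer_instance

-- ===== CLAIM (what is proved, stated in full; the proofs are below) =====
def Claim_equal_greedySearchAlgorithm : Prop := ∀ (type : List Int) (cost : List Int) (reach : List Int) (budget : Int), Dom_greedySearchAlgorithm type cost reach budget → Pre_greedySearchAlgorithm type cost reach budget → Spec_greedySearchAlgorithm type cost reach budget (greedySearchAlgorithm type cost reach budget)

-- ===== LEMMAS AND PROOFS =====

theorem pv_witness_ok :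
    Dom_greedySearchAlgorithm pvWitness_greedySearchAlgorithm.1 pvWitness_greedySearchAlgorithm.2.1 pvWitness_greedySearchAlgorithm.2.2.1 pvWitness_greedySearchAlgorithm.2.2.2 ∧
    Pre_greedySearchAlgorithm pvWitness_greedySearchAlgorithm.1 pvWitness_greedySearchAlgorithm.2.1 pvWitness_greedySearchAlgorithm.2.2.1 pvWitness_greedySearchAlgorithm.2.2.2 := by
  constructor <;> decide

-- the comparator sorted2 uses for B's key (-cost[i], i)
def pvBefore (cost : List Int) (a b : Int) : Bool :=
  decide (-(PySem.List.pyGetD cost a 0) < -(PySem.List.pyGetD cost b 0)) ||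
    (!decide (-(PySem.List.pyGetD cost b 0) < -(PySem.List.pyGetD cost a 0)) && decide (a < b))

-- ---- generic facts about insertion sort via insertBy ----

theorem pv_pairwise_insertBy {α : Type} (r : α → α → Bool)
    (htrans : ∀ a b c, r a b = true → r b c = true → r a c = true)
    (htot : ∀ a b, a ≠ b → r a b = true ∨ r b a = true)
    (x : α) (ys : List α) (hx : x ∉ ys)
    (hy : ys.Pairwise (fun a b => r a b = true)) :
    (PySem.List.insertBy r x ys).Pairwise (fun a b => r a b = true) := by
  induction ys with
  | nil => simp [PySem.List.insertBy]
  | cons y ys ih =>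
    rcases List.pairwise_cons.1 hy with ⟨hyall, hys⟩
    have hxny : x ≠ y := fun he => hx (he ▸ List.mem_cons_self)
    have hxys : x ∉ ys := fun he => hx (List.mem_cons_of_mem _ he)
    by_cases hxy : r x y = true
    · simp only [PySem.List.insertBy, hxy, if_true]
      refine List.pairwise_cons.2 ⟨?_, hy⟩
      intro z hz
      rcases List.mem_cons.1 hz with rfl | hz
      · exact hxy
      · exact htrans x y z hxy (hyall z hz)
    · simp only [PySem.List.insertBy, hxy]
      refine List.pairwise_cons.2 ⟨?_, ih hxys hys⟩
      intro z hz
      have hmem := (PySem.List.mem_insertBy r x z ys).1 hz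
      rcases hmem with hzx | hzy
      · subst hzx
        rcases htot z y hxny with h | h
        · exact absurd h hxy
        · exact h
      · exact hyall z hzy

theorem pv_pairwise_foldl_insertBy {α : Type} (r : α → α → Bool)
    (htrans : ∀ a b c, r a b = true → r b c = true → r a c = true)
    (htot : ∀ a b, a ≠ b → r a b = true ∨ r b a = true) :
    ∀ (xs acc : List α), acc.Pairwise (fun a b => r a b = true) →
      (∀ x ∈ xs, x ∉ acc) → xs.Nodup →
      (xs.foldl (fun acc x => PySem.List.insertBy r x acc) acc).Pairwise (fun a b => r a b = true)
  | [], acc, hacc, _, _ => hacc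
  | x :: xs, acc, hacc, hdisj, hnd => by
    simp only [List.foldl_cons]
    apply pv_pairwise_foldl_insertBy r htrans htot xs
    · exact pv_pairwise_insertBy r htrans htot x acc (hdisj x (by simp)) hacc
    · intro y hy hmem
      rcases (PySem.List.mem_insertBy r x y acc).1 hmem with h | h
      · subst h; exact (List.nodup_cons.1 hnd).1 hy
      · exact hdisj y (by simp [hy]) h
    · exact (List.nodup_cons.1 hnd).2

-- ---- facts about B's order list ----

theorem pv_mem_pvOrder (cost : List Int) (i : Int) :
    i ∈ pvOrder cost ↔ 0 ≤ i ∧ i < (cost.length : Int) ∧ 0 < PySem.List.pyGetD cost i 0 := by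
  unfold pvOrder
  rw [(PySem.List.sorted2_perm _ _ _ _).mem_iff]
  simp only [List.mem_filter, PySem.List.mem_pyRange_one, decide_eq_true_eq]
  tauto

theorem pv_nodup_pvOrder (cost : List Int) : (pvOrder cost).Nodup := by
  unfold pvOrder
  exact (PySem.List.sorted2_perm _ _ _ _).nodup_iff.2
    ((PySem.List.nodup_pyRange_one _ _).filter _)

theorem pv_pairwise_pvOrder (cost : List Int) :
    (pvOrder cost).Pairwise (fun a b => pvBefore cost a b = true) := by
  have hrw : pvOrder cost =
      ((PySem.List.pyRange 0 cost.length 1).filter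
        (fun i => 0 < PySem.List.pyGetD cost i 0)).foldl
        (fun acc x => PySem.List.insertBy (pvBefore cost) x acc) [] := rfl
  rw [hrw]
  apply pv_pairwise_foldl_insertBy
  · intro a b c hab hbc
    simp only [pvBefore, Bool.or_eq_true, Bool.and_eq_true, Bool.not_eq_true',
      decide_eq_true_eq, decide_eq_false_iff_not] at *
    omega
  · intro a b hab
    simp only [pvBefore, Bool.or_eq_true, Bool.and_eq_true, Bool.not_eq_true',
      decide_eq_true_eq, decide_eq_false_iff_not]
    omega
  · exact List.Pairwise.nil
  · simp
  · exact (PySem.List.nodup_pyRange_one _ _).filter _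

-- consequences of the comparator on pvOrder
theorem pv_before_le (cost : List Int) (a b : Int) (h : pvBefore cost a b = true) :
    PySem.List.pyGetD cost b 0 ≤ PySem.List.pyGetD cost a 0 := by
  simp only [pvBefore, Bool.or_eq_true, Bool.and_eq_true, Bool.not_eq_true',
    decide_eq_true_eq, decide_eq_false_iff_not] at h
  omega

theorem pv_before_lt_of_gt (cost : List Int) (a b : Int) (h : pvBefore cost a b = true)
    (hba : b < a) : PySem.List.pyGetD cost b 0 < PySem.List.pyGetD cost a 0 := by
  simp only [pvBefore, Bool.or_eq_true, Bool.and_eq_true, Bool.not_eq_true',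
    decide_eq_true_eq, decide_eq_false_iff_not] at h
  omega

-- ---- flag-list indexing helpers ----

theorem pv_pyGetD_oob (xs : List Int) (i : Int) (d : Int)
    (h : ¬ PySem.Raise.InRange xs.length i) : PySem.List.pyGetD xs i d = d :=
  PySem.List.pyGetD_of_none xs i d ((PySem.List.pyGet?_eq_none_iff xs i).2 h)

theorem pv_flags_zero (type : List Int) (i : Int) :
    PySem.List.pyGetD (type.map (fun _ => (0 : Int))) i 0 = 0 := by
  by_cases h : PySem.Raise.InRange (type.map (fun _ => (0 : Int))).length i
  · have hmem := PySem.List.pyGetD_mem (type.map (fun _ => (0 : Int))) (d := 0) h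
    simp only [List.mem_map] at hmem
    rcases hmem with ⟨_, _, hz⟩
    omega
  · exact pv_pyGetD_oob _ _ _ h

theorem pv_pyGetD_set_self (tf : List Int) (h : Int) (v d : Int)
    (h0 : 0 ≤ h) (hlen : h.toNat < tf.length) :
    PySem.List.pyGetD (PySem.List.pySetD tf h v) h d = v := by
  rw [PySem.List.pySetD_of_nonneg tf v h0]
  rw [PySem.List.pyGetD_eq_getElem _ d h0 (by simp; omega)]
  simp

theorem pv_pyGetD_set_ne (tf : List Int) (h i : Int) (v d : Int)
    (h0 : 0 ≤ h) (hi : 0 ≤ i) (hne : i ≠ h) :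
    PySem.List.pyGetD (PySem.List.pySetD tf h v) i d = PySem.List.pyGetD tf i d := by
  rw [PySem.List.pySetD_of_nonneg tf v h0]
  by_cases hilen : i < (tf.length : Int)
  · rw [PySem.List.pyGetD_eq_getElem _ d hi (by simpa using hilen),
      PySem.List.pyGetD_eq_getElem _ d hi hilen]
    apply List.getElem_set_ne
    omega
  · rw [pv_pyGetD_oob _ _ _ (fun hr => by
        rcases hr with ⟨_, h2⟩; simp only [List.length_set] at h2; omega),
      pv_pyGetD_oob _ _ _ (fun hr => by rcases hr with ⟨_, h2⟩; omega)]

-- ---- the inner scan of port A ----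

theorem pvScanA_append (tf : List Int) (cc b : Int) (xs ys : List (Int × Int))
    (st : Int × Option Int) :
    pvScanA tf cc b (xs ++ ys) st = pvScanA tf cc b ys (pvScanA tf cc b xs st) := by
  induction xs generalizing st with
  | nil => rfl
  | cons p xs ih =>
    obtain ⟨count, i⟩ := p
    obtain ⟨m, idx⟩ := st
    simp only [List.cons_append, pvScanA]
    split_ifs <;> exact ih _

-- the running maximum stays nonnegative and below any bound dominating all eligible items
theorem pvScanA_lt (tf : List Int) (cc b : Int) (pairs : List (Int × Int))
    (C : Int) :
    ∀ (m : Int) (idx : Option Int), 0 ≤ m → m < C →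
    (∀ p ∈ pairs, 0 < p.2 → cc + p.2 ≤ b → PySem.List.pyGetD tf p.1 0 = 0 → p.2 < C) →
    0 ≤ (pvScanA tf cc b pairs (m, idx)).1 ∧ (pvScanA tf cc b pairs (m, idx)).1 < C := by
  induction pairs with
  | nil => intro m idx hm hmC _; exact ⟨hm, hmC⟩
  | cons p rest ih =>
    intro m idx hm hmC hall
    obtain ⟨count, i⟩ := p
    simp only [pvScanA]
    split_ifs with hgood
    · obtain ⟨h1, h2, h3⟩ := hgood
      exact ih i (some count) (by omega)
        (hall (count, i) (by simp) (by omega) h2 h3)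
        (fun q hq => hall q (by simp [hq]))
    · exact ih m idx hm hmC (fun q hq => hall q (by simp [hq]))

-- no eligible item beats the running maximum: the scan is a no-op
theorem pvScanA_none (tf : List Int) (cc b : Int) (pairs : List (Int × Int)) :
    ∀ (m : Int) (idx : Option Int), 0 ≤ m →
    (∀ p ∈ pairs, 0 < p.2 → cc + p.2 ≤ b → PySem.List.pyGetD tf p.1 0 = 0 → p.2 ≤ m) →
    pvScanA tf cc b pairs (m, idx) = (m, idx) := by
  induction pairs with
  | nil => intro m idx _ _; rfl
  | cons p rest ih =>
    intro m idx hm hall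
    obtain ⟨count, i⟩ := p
    simp only [pvScanA]
    split_ifs with hgood
    · obtain ⟨h1, h2, h3⟩ := hgood
      have := hall (count, i) (by simp) (by omega) h2 h3
      omega
    · exact ih m idx hm (fun q hq => hall q (by simp [hq]))

-- the scan finds exactly the eligible item that strictly dominates everything before it
-- and weakly dominates everything after it
theorem pvScanA_pick (tf : List Int) (cc b : Int)
    (before after : List (Int × Int)) (h ch : Int)
    (hch : 0 < ch) (hfit : cc + ch ≤ b) (hflag : PySem.List.pyGetD tf h 0 = 0)
    (hb : ∀ p ∈ before, 0 < p.2 → cc + p.2 ≤ b → PySem.List.pyGetD tf p.1 0 = 0 → p.2 < ch)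
    (ha : ∀ p ∈ after, 0 < p.2 → cc + p.2 ≤ b → PySem.List.pyGetD tf p.1 0 = 0 → p.2 ≤ ch) :
    pvScanA tf cc b (before ++ (h, ch) :: after) (0, none) = (ch, some h) := by
  rw [pvScanA_append]
  obtain ⟨hm0, hmlt⟩ := pvScanA_lt tf cc b before ch 0 none le_rfl hch hb
  rcases hst : pvScanA tf cc b before (0, none) with ⟨m1, idx1⟩
  rw [hst] at hm0 hmlt
  simp only at hm0 hmlt
  simp only [pvScanA]
  rw [if_pos ⟨hmlt, hfit, hflag⟩]
  exact pvScanA_none tf cc b after ch (some h) (le_of_lt hch) ha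

-- ---- splitting enumerate(cost) at an index ----

theorem pv_enumerate_split (cost : List Int) (h : Int) (h0 : 0 ≤ h)
    (hn : h < (cost.length : Int)) :
    PySem.List.enumerate cost =
      ((PySem.List.pyRange 0 h 1).map (fun j => (j, PySem.List.pyGetD cost j 0))) ++
        (h, PySem.List.pyGetD cost h 0) ::
        ((PySem.List.pyRange (h + 1) cost.length 1).map
          (fun j => (j, PySem.List.pyGetD cost j 0))) := by
  rw [PySem.List.enumerate_eq_map_pyRange (d := 0)]
  simp only [PySem.List.len_eq]
  rw [PySem.List.pyRange_one_append 0 h cost.length h0 (by omega),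
    PySem.List.pyRange_one_cons hn]
  simp

-- every enumerate pair is (index, cost[index])
theorem pv_mem_enumerate (cost : List Int) (p : Int × Int)
    (hp : p ∈ PySem.List.enumerate cost) :
    0 ≤ p.1 ∧ p.1 < (cost.length : Int) ∧ p.2 = PySem.List.pyGetD cost p.1 0 := by
  rcases (PySem.List.mem_enumerate_iff _ _ _).1 hp with ⟨k, hk, rfl⟩
  refine ⟨by omega, by omega, ?_⟩
  simp only [zero_add]
  rw [PySem.List.pyGetD_natCast]
  exact (List.getD_eq_getElem _ _ hk).symm

-- ---- the main loop invariant: A's while-loop computes B's single pass over pvOrder ----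

theorem pv_main (type cost reach : List Int) (budget : Int)
    (hpre : Pre_greedySearchAlgorithm type cost reach budget) :
    ∀ (S P tf : List Int) (cc cr : Int) (fuel : Nat),
      pvOrder cost = P ++ S →
      S.length < fuel →
      0 ≤ cc →
      tf.length = type.length →
      (∀ j ∈ P, PySem.List.pyGetD tf j 0 ≠ 0 ∨ budget < cc + PySem.List.pyGetD cost j 0) →
      (∀ j ∈ S, PySem.List.pyGetD tf j 0 = 0) →
      pvLoopA cost reach budget fuel tf cc cr =
        S.foldl (pvStepB cost reach budget) (tf, cc, cr) := by
  intro S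
  induction S with
  | nil =>
    intro P tf cc cr fuel hsplit hfuel hcc htf hP hS
    cases fuel with
    | zero => omega
    | succ f =>
      simp only [List.foldl_nil, pvLoopA]
      have hscan : pvScanA tf cc budget (PySem.List.enumerate cost) (0, none) = (0, none) := by
        apply pvScanA_none _ _ _ _ _ _ le_rfl
        intro p hp h1 h2 h3
        exfalso
        obtain ⟨hp0, hplen, hpeq⟩ := pv_mem_enumerate cost p hp
        have hmem : p.1 ∈ pvOrder cost :=
          (pv_mem_pvOrder cost p.1).2 ⟨hp0, hplen, by rw [← hpeq]; exact h1⟩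
        rw [hsplit, List.append_nil] at hmem
        rcases hP p.1 hmem with hflag | hbud
        · exact hflag h3
        · rw [← hpeq] at hbud; omega
      rw [hscan]
  | cons h S' ih =>
    intro P tf cc cr fuel hsplit hfuel hcc htf hP hS
    have hmem : h ∈ pvOrder cost := by
      rw [hsplit]; exact List.mem_append_right _ List.mem_cons_self
    obtain ⟨hh0, hhlen, hhpos⟩ := (pv_mem_pvOrder cost h).1 hmem
    have hflagh : PySem.List.pyGetD tf h 0 = 0 := hS h List.mem_cons_self
    have hmemP : ∀ j ∈ P, j ∈ pvOrder cost := by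
      intro j hj; rw [hsplit]; exact List.mem_append_left _ hj
    have hmemS : ∀ j ∈ h :: S', j ∈ pvOrder cost := by
      intro j hj; rw [hsplit]; exact List.mem_append_right _ hj
    have hnd : (P ++ h :: S').Nodup := by rw [← hsplit]; exact pv_nodup_pvOrder cost
    have hhnotP : h ∉ P := fun hhP =>
      (List.disjoint_of_nodup_append hnd) hhP List.mem_cons_self
    have hhnotS' : h ∉ S' :=
      (List.nodup_cons.1 (List.nodup_append.1 hnd).2.1).1
    have hpw : (P ++ h :: S').Pairwise (fun a b => pvBefore cost a b = true) := by
      rw [← hsplit]; exact pv_pairwise_pvOrder cost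
    have hhS' : ∀ k ∈ S', pvBefore cost h k = true :=
      (List.pairwise_cons.1 (List.pairwise_append.1 hpw).2.1).1
    by_cases hfit : cc + PySem.List.pyGetD cost h 0 ≤ budget
    · -- A picks h; B takes h
      have hgetd : cost.getD h.toNat 0 = PySem.List.pyGetD cost h 0 := by
        conv_rhs => rw [← Int.toNat_of_nonneg hh0]
        rw [PySem.List.pyGetD_natCast]
      obtain ⟨htlen, hrlen⟩ := hpre h.toNat (by omega)
        (by rw [hgetd]; exact hhpos) (by rw [hgetd]; omega)
      cases fuel with
      | zero => simp at hfuel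
      | succ f =>
        have hscan : pvScanA tf cc budget (PySem.List.enumerate cost) (0, none) =
            (PySem.List.pyGetD cost h 0, some h) := by
          rw [pv_enumerate_split cost h hh0 hhlen]
          apply pvScanA_pick tf cc budget _ _ h _ hhpos hfit hflagh
          · intro p hp h1 h2 h3
            rcases List.mem_map.1 hp with ⟨j, hj, rfl⟩
            obtain ⟨hj0, hjh⟩ := PySem.List.mem_pyRange_one.1 hj
            simp only at h1 h2 h3 ⊢
            have hjmem : j ∈ pvOrder cost := (pv_mem_pvOrder cost j).2 ⟨hj0, by omega, h1⟩
            rw [hsplit] at hjmem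
            rcases List.mem_append.1 hjmem with hjP | hjS
            · rcases hP j hjP with hf | hb
              · exact absurd h3 hf
              · omega
            · rcases List.mem_cons.1 hjS with rfl | hjS'
              · omega
              · exact pv_before_lt_of_gt cost h j (hhS' j hjS') hjh
          · intro p hp h1 h2 h3
            rcases List.mem_map.1 hp with ⟨j, hj, rfl⟩
            obtain ⟨hjh, hjlen⟩ := PySem.List.mem_pyRange_one.1 hj
            simp only at h1 h2 h3 ⊢
            have hjmem : j ∈ pvOrder cost :=
              (pv_mem_pvOrder cost j).2 ⟨by omega, by omega, h1⟩
            rw [hsplit] at hjmem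
            rcases List.mem_append.1 hjmem with hjP | hjS
            · rcases hP j hjP with hf | hb
              · exact absurd h3 hf
              · omega
            · rcases List.mem_cons.1 hjS with rfl | hjS'
              · omega
              · exact pv_before_le cost h j (hhS' j hjS')
        simp only [pvLoopA]
        rw [hscan, List.foldl_cons]
        have hstep : pvStepB cost reach budget (tf, cc, cr) h =
            (PySem.List.pySetD tf h 1, cc + PySem.List.pyGetD cost h 0,
              cr + PySem.List.pyGetD reach h 0) := by
          unfold pvStepB; rw [if_pos hfit]
        rw [hstep]
        apply ih (P ++ [h]) _ _ _ f
        · rw [hsplit, List.append_assoc]; rfl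
        · simp only [List.length_cons] at hfuel; omega
        · omega
        · rw [PySem.List.length_pySetD]; exact htf
        · intro j hj
          rcases List.mem_append.1 hj with hjP | hjh
          · have hj0 : 0 ≤ j := ((pv_mem_pvOrder cost j).1 (hmemP j hjP)).1
            have hjneh : j ≠ h := fun he => hhnotP (he ▸ hjP)
            rcases hP j hjP with hf | hb
            · left; rw [pv_pyGetD_set_ne tf h j 1 0 hh0 hj0 hjneh]; exact hf
            · right; omega
          · have hje : j = h := by simpa using hjh
            subst hje
            left
            rw [pv_pyGetD_set_self tf j 1 0 hh0 (by omega)]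
            omega
        · intro j hj
          have hj0 : 0 ≤ j := ((pv_mem_pvOrder cost j).1 (hmemS j (List.mem_cons_of_mem _ hj))).1
          have hjneh : j ≠ h := fun he => hhnotS' (he ▸ hj)
          rw [pv_pyGetD_set_ne tf h j 1 0 hh0 hj0 hjneh]
          exact hS j (List.mem_cons_of_mem _ hj)
    · -- h does not fit: both sides skip it
      rw [List.foldl_cons]
      have hstep : pvStepB cost reach budget (tf, cc, cr) h = (tf, cc, cr) := by
        unfold pvStepB; rw [if_neg hfit]
      rw [hstep]
      apply ih (P ++ [h]) tf cc cr fuel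
      · rw [hsplit, List.append_assoc]; rfl
      · simp only [List.length_cons] at hfuel; omega
      · exact hcc
      · exact htf
      · intro j hj
        rcases List.mem_append.1 hj with hjP | hjh
        · exact hP j hjP
        · have hje : j = h := by simpa using hjh
          subst hje
          right; omega
      · intro j hj
        exact hS j (List.mem_cons_of_mem _ hj)

-- ===== VERDICT (by name: the statement is the Claim_ definition above) =====
theorem greedySearchAlgorithm_spec : Claim_equal_greedySearchAlgorithm := by
  intro type cost reach budget hdom hpre
  unfold Spec_greedySearchAlgorithm
  have hmain := pv_main type cost reach budget hpre (pvOrder cost) []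
    (type.map (fun _ => (0 : Int))) 0 0 (cost.length + 1)
    (by simp)
    (by
      have hperm := (PySem.List.sorted2_perm
        ((PySem.List.pyRange 0 cost.length 1).filter
          (fun i => 0 < PySem.List.pyGetD cost i 0))
        (fun i => -(PySem.List.pyGetD cost i 0)) (fun i => i) false).length_eq
      have hle := List.length_filter_le
        (fun i => decide (0 < PySem.List.pyGetD cost i 0)) (PySem.List.pyRange 0 cost.length 1)
      have hlen := PySem.List.length_pyRange_one 0 (cost.length : Int)
      unfold pvOrder
      omega)
    le_rfl
    (by simp)
    (by simp)
    (fun j _ => pv_flags_zero type j)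
  have hA : greedySearchAlgorithm type cost reach budget =
      (PySem.Str.join ""
        ((pvLoopA cost reach budget (cost.length + 1) (type.map (fun _ => (0 : Int))) 0 0).1.map
          PySem.Int.toStr),
       (pvLoopA cost reach budget (cost.length + 1) (type.map (fun _ => (0 : Int))) 0 0).2.1,
       (pvLoopA cost reach budget (cost.length + 1) (type.map (fun _ => (0 : Int))) 0 0).2.2) := rfl
  have hB : greedySearchAlgorithm_alt type cost reach budget =
      (PySem.Str.join ""
        (((pvOrder cost).foldl (pvStepB cost reach budget)
            (type.map (fun _ => (0 : Int)), 0, 0)).1.map PySem.Int.toStr),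
       ((pvOrder cost).foldl (pvStepB cost reach budget)
          (type.map (fun _ => (0 : Int)), 0, 0)).2.1,
       ((pvOrder cost).foldl (pvStepB cost reach budget)
          (type.map (fun _ => (0 : Int)), 0, 0)).2.2) := rfl
  rw [hA, hB, hmain]
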